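-- pv_equiv track=rewrite | github.com/Dara-to-win/Plate-Recognition | cnn/prediction.py | get_plate
-- ===== SOURCE A (Python) =====
-- def get_plate(string):
--     provinces = ["皖", "沪", "津", "渝", "冀", "晋", "蒙", "辽", "吉", "黑", "苏", "浙", "京", "闽", "赣", "鲁", "豫", "鄂",
--                  "湘", "粤", "桂", "琼", "川", "贵", "云", "藏", "陕", "甘", "青", "宁", "新", "警", "学", "O"]
--     provinces_code = ["00", "01", "02", "03", "04", "05", "06", "07", "08", "09", "10", "11", "12", "13", "14", "15",
--                       "16", "17", "18", "19", "20", "21", "22", "23", "24", "25", "26", "27", "28", "29", "30", "31",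
--                       "32", "33"]
--     result = ''
--     temp = string[0] + string[1]
--     for i in range(0, len(provinces_code)):
--         if provinces_code[i] == temp:
--             result = provinces[i]
--             for j in range(2, len(string)):
--                 result += string[j]
--     return result
-- ===== SOURCE B (Python) =====
-- def get_plate(string):
--     provinces = ["皖", "沪", "津", "渝", "冀", "晋", "蒙", "辽", "吉", "黑", "苏", "浙", "京", "闽", "赣", "鲁", "豫", "鄂",
--                  "湘", "粤", "桂", "琼", "川", "贵", "云", "藏", "陕", "甘", "青", "宁", "新", "警", "学", "O"]
--     temp = string[:2]
--     if temp.isascii() and temp.isdigit():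
--         n = int(temp)
--         if n < 34:
--             return provinces[n] + string[2:]
--     return ''
-- ===== Notes on version B (the rewrite author's own statement) =====
-- stated objective: simpler
-- what changed: B replaces the linear scan over the parallel code table and the char-by-char append loop with a direct arithmetic index (int of the first two digits) into the province list plus a slice for the suffix.
import Mathlib
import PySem

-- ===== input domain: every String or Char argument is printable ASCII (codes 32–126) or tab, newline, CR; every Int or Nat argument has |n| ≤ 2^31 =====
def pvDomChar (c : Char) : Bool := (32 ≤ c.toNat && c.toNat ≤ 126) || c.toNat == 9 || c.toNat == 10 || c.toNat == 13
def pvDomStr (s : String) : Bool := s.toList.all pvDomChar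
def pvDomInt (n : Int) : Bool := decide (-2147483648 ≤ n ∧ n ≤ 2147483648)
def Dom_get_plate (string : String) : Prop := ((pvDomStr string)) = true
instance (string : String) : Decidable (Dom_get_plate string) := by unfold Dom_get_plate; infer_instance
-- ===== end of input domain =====

-- B replaces A's scan of a parallel two-digit code table (plus a char-by-char append loop)
-- by a direct arithmetic index into the province list plus a slice; objective: simpler.

-- ===== PORT A =====
def pvProvinces : List String :=
  ["皖", "沪", "津", "渝", "冀", "晋", "蒙", "辽", "吉", "黑", "苏", "浙", "京", "闽", "赣", "鲁", "豫", "鄂",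
   "湘", "粤", "桂", "琼", "川", "贵", "云", "藏", "陕", "甘", "青", "宁", "新", "警", "学", "O"]

def pvCodes : List String :=
  ["00", "01", "02", "03", "04", "05", "06", "07", "08", "09", "10", "11", "12", "13", "14", "15",
   "16", "17", "18", "19", "20", "21", "22", "23", "24", "25", "26", "27", "28", "29", "30", "31",
   "32", "33"]

def get_plate (string : String) : String :=
  match PySem.Str.pyGet? string 0, PySem.Str.pyGet? string 1 with
  | some a, some b =>
      let temp : String := String.ofList [a, b]       -- temp = string[0] + string[1]
      (PySem.List.pyRange 0 (pvCodes.length : Int) 1).foldl (fun result i =>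
        if PySem.List.pyGetD pvCodes i "" == temp then
          -- result = provinces[i]; for j in range(2, len(string)): result += string[j]
          (PySem.List.pyRange 2 (PySem.Str.len string) 1).foldl (fun r j =>
            match PySem.Str.pyGet? string j with
            | some c => r ++ String.ofList [c]
            | none => r) (PySem.List.pyGetD pvProvinces i "")
        else result) ""
  | _, _ => ""                                        -- string[0]/string[1] raises IndexError: outside Pre_

-- ===== PORT B =====
def get_plate_alt (string : String) : String :=
  let temp := PySem.Str.slice string (some 0) (some 2)            -- temp = string[:2]
  -- temp.isascii(): ported by hand, exact — true iff every code point is < 128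
  if temp.toList.all (fun c => c.toNat < 128) && PySem.Str.strIsdigit temp then
    match PySem.Int.ofStr? temp with                              -- n = int(temp)
    | some n =>
        if n < 34 then PySem.List.pyGetD pvProvinces n "" ++ PySem.Str.slice string (some 2) none
        else ""
    | none => ""
  else ""

-- ===== PRECONDITION & SPEC =====
-- Pre_ excludes exactly the strings of length < 2, on which A raises IndexError at string[1].
def Pre_get_plate (string : String) : Prop := 2 ≤ string.toList.length
instance (string : String) : Decidable (Pre_get_plate string) := by unfold Pre_get_plate; infer_instance
def pvWitness_get_plate : String := "0512"

def Spec_get_plate (string : String) (out : String) : Prop := out = get_plate_alt string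
instance (string : String) (out : String) : Decidable (Spec_get_plate string out) := by unfold Spec_get_plate; infer_instance

-- ===== CLAIM (what is proved, stated in full; the proofs are below) =====
def Claim_equal_get_plate : Prop := ∀ (string : String), Dom_get_plate string → Pre_get_plate string → Spec_get_plate string (get_plate string)

-- ===== LEMMAS AND PROOFS =====

-- selector form of A's outer loop: the province (if any) picked for the two head chars
def pvSelA (a b : Char) : Option String :=
  (PySem.List.pyRange 0 (pvCodes.length : Int) 1).foldl (fun o i =>
    if PySem.List.pyGetD pvCodes i "" == String.ofList [a, b] then some (PySem.List.pyGetD pvProvinces i "") else o) none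

-- selector form of B's branch for the two head chars
def pvSelB (a b : Char) : Option String :=
  if ([a, b].all (fun c => c.toNat < 128)) && PySem.Chars.strIsdigit [a, b] then
    match PySem.Int.ofChars? [a, b] with
    | some n => if n < 34 then some (PySem.List.pyGetD pvProvinces n "") else none
    | none => none
  else none

-- the two selectors agree on all digit pairs (checked exhaustively)
set_option maxRecDepth 8000 in
theorem pv_digits_eq : ∀ a, 48 ≤ a → a ≤ 57 → ∀ b, 48 ≤ b → b ≤ 57 →
    pvSelA (Char.ofNat a) (Char.ofNat b) = pvSelB (Char.ofNat a) (Char.ofNat b) := by decide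

-- A's inner loop 'for j in range(k, len(l)): result += l[j]' appends the dropped tail
theorem pv_inner_fold (l : List Char) (k : Nat) (init : String) :
    (PySem.List.pyRange (k : Int) (l.length : Int) 1).foldl (fun r j =>
        match PySem.List.pyGet? l j with
        | some c => r ++ String.ofList [c]
        | none => r) init = init ++ String.ofList (l.drop k) := by
  by_cases h : k < l.length
  · rw [PySem.List.pyRange_one_cons (by omega)]
    simp only [List.foldl_cons]
    rw [PySem.List.pyGet?_natCast, List.getElem?_eq_getElem h]
    have hc : ((k : Int) + 1) = ((k+1 : Nat) : Int) := by push_cast; ring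
    rw [hc, pv_inner_fold l (k+1), List.drop_eq_getElem_cons h]
    rw [String.append_assoc, ← String.ofList_append]
    rfl
  · rw [PySem.List.pyRange_one_eq_nil (by omega)]
    rw [List.drop_eq_nil_of_le (by omega)]
    simp
termination_by l.length - k

-- a last-match fold building strings is the option-valued fold with the suffix appended
theorem pv_fold_opt_gen (cond : Int → Bool) (val : Int → String) (suf : String) (l : List Int) :
    ∀ (o : Option String),
    l.foldl (fun r i => if cond i then val i ++ suf else r)
        (match o with | some p => p ++ suf | none => "") =
      match l.foldl (fun o i => if cond i then some (val i) else o) o with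
      | some p => p ++ suf
      | none => "" := by
  induction l with
  | nil => intro o; rfl
  | cons x xs ih =>
      intro o
      simp only [List.foldl_cons]
      by_cases hc : cond x
      · simpa [hc] using ih (some (val x))
      · simpa [hc] using ih o

theorem pv_fold_opt (cond : Int → Bool) (val : Int → String) (suf : String) (l : List Int) :
    l.foldl (fun r i => if cond i then val i ++ suf else r) "" =
      match l.foldl (fun o i => if cond i then some (val i) else o) none with
      | some p => p ++ suf
      | none => "" :=
  pv_fold_opt_gen cond val suf l none

theorem pv_foldl_opt_none (cond : Int → Bool) (val : Int → String) (l : List Int)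
    (h : ∀ i ∈ l, cond i = false) :
    l.foldl (fun o i => if cond i then some (val i) else o) none = none := by
  induction l with
  | nil => rfl
  | cons x xs ih =>
      simp only [List.foldl_cons, h x (by simp)]
      exact ih (fun i hi => h i (by simp [hi]))

theorem pv_selA_none (a b : Char)
    (hd : ¬(PySem.Chars.isdigit a = true ∧ PySem.Chars.isdigit b = true)) :
    pvSelA a b = none := by
  unfold pvSelA
  apply pv_foldl_opt_none
  intro i hi
  have hr := (PySem.List.mem_pyRange_one).mp hi
  by_contra hbeq
  have hbt : (PySem.List.pyGetD pvCodes i "" == String.ofList [a, b]) = true := by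
    cases hx : (PySem.List.pyGetD pvCodes i "" == String.ofList [a, b]) <;> simp_all
  have heq : PySem.List.pyGetD pvCodes i "" = String.ofList [a, b] := by
    simpa using hbt
  have hmem : PySem.List.pyGetD pvCodes i "" ∈ pvCodes := by
    apply PySem.List.pyGetD_mem
    simp only [PySem.Raise.InRange]
    constructor <;> [omega; exact lt_of_lt_of_le hr.2 (by norm_num [pvCodes])]
  rw [heq] at hmem
  have hall : ∀ s ∈ pvCodes, s.toList.all PySem.Chars.isdigit = true := by decide
  have := hall _ hmem
  simp at this
  exact hd ⟨this.1, this.2⟩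

theorem pv_selB_none (a b : Char)
    (hd : ¬(PySem.Chars.isdigit a = true ∧ PySem.Chars.isdigit b = true)) :
    pvSelB a b = none := by
  unfold pvSelB
  have : PySem.Chars.strIsdigit [a, b] = false := by
    by_cases h1 : PySem.Chars.isdigit a = true
    · by_cases h2 : PySem.Chars.isdigit b = true
      · exact absurd ⟨h1, h2⟩ hd
      · simp only [Bool.not_eq_true] at h2
        simp [PySem.Chars.strIsdigit, h2]
    · simp only [Bool.not_eq_true] at h1
      simp [PySem.Chars.strIsdigit, h1]
  simp [this]

theorem pv_isdigit_bounds (c : Char) (h : PySem.Chars.isdigit c = true) :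
    48 ≤ c.toNat ∧ c.toNat ≤ 57 := by
  simp only [PySem.Chars.isdigit, Bool.and_eq_true, decide_eq_true_eq] at h
  exact h

theorem pv_sel_eq (a b : Char) (_ha : a.toNat < 128) (_hb : b.toNat < 128) :
    pvSelA a b = pvSelB a b := by
  by_cases hd : PySem.Chars.isdigit a = true ∧ PySem.Chars.isdigit b = true
  · obtain ⟨ha1, ha2⟩ := pv_isdigit_bounds a hd.1
    obtain ⟨hb1, hb2⟩ := pv_isdigit_bounds b hd.2
    have := pv_digits_eq a.toNat ha1 ha2 b.toNat hb1 hb2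
    rwa [Char.ofNat_toNat, Char.ofNat_toNat] at this
  · rw [pv_selA_none a b hd, pv_selB_none a b hd]

theorem pv_A_char (s : String) (c0 c1 : Char) (rest : List Char)
    (hsl : s.toList = c0 :: c1 :: rest) :
    get_plate s = match pvSelA c0 c1 with
                  | some p => p ++ String.ofList rest
                  | none => "" := by
  have h0 : PySem.Str.pyGet? s 0 = some c0 := by
    simp [hsl]
  have h1 : PySem.Str.pyGet? s 1 = some c1 := by
    simp [hsl]
  unfold get_plate
  rw [h0, h1]
  simp only
  have hbody : (fun (result : String) (i : Int) =>
      if PySem.List.pyGetD pvCodes i "" == String.ofList [c0, c1] then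
        (PySem.List.pyRange 2 (PySem.Str.len s) 1).foldl (fun r j =>
          match PySem.Str.pyGet? s j with
          | some c => r ++ String.ofList [c]
          | none => r) (PySem.List.pyGetD pvProvinces i "")
      else result) =
      (fun (result : String) (i : Int) =>
      if PySem.List.pyGetD pvCodes i "" == String.ofList [c0, c1] then
        PySem.List.pyGetD pvProvinces i "" ++ String.ofList rest
      else result) := by
    funext result i
    congr 1
    have hlen : PySem.Str.len s = ((s.toList.length : Nat) : Int) := by
      simp [PySem.Str.len]
    have htwo : (2 : Int) = ((2 : Nat) : Int) := by norm_num
    calc (PySem.List.pyRange 2 (PySem.Str.len s) 1).foldl (fun r j =>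
          match PySem.Str.pyGet? s j with
          | some c => r ++ String.ofList [c]
          | none => r) (PySem.List.pyGetD pvProvinces i "")
        = (PySem.List.pyRange ((2:Nat) : Int) ((s.toList.length : Nat) : Int) 1).foldl (fun r j =>
          match PySem.List.pyGet? s.toList j with
          | some c => r ++ String.ofList [c]
          | none => r) (PySem.List.pyGetD pvProvinces i "") := by
          rw [← hlen, ← htwo]
          simp [PySem.Str.pyGet?]
      _ = PySem.List.pyGetD pvProvinces i "" ++ String.ofList (s.toList.drop 2) :=
          pv_inner_fold s.toList 2 _
      _ = PySem.List.pyGetD pvProvinces i "" ++ String.ofList rest := by rw [hsl]; rfl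
  rw [hbody, pv_fold_opt]
  rfl

theorem pv_B_char (s : String) (c0 c1 : Char) (rest : List Char)
    (hsl : s.toList = c0 :: c1 :: rest) :
    get_plate_alt s = match pvSelB c0 c1 with
                      | some p => p ++ String.ofList rest
                      | none => "" := by
  have htemp : PySem.Str.slice s (some 0) (some 2) = String.ofList [c0, c1] := by
    show String.ofList (PySem.Chars.slice s.toList (some 0) (some 2)) = _
    rw [hsl]
    congr 1
  have hsuf : PySem.Str.slice s (some 2) none = String.ofList rest := by
    show String.ofList (PySem.Chars.slice s.toList (some 2) none) = _
    rw [hsl]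
    congr 1
    simp [PySem.Chars.slice_eq_listSlice, PySem.List.slice, PySem.List.clampIdx]
  unfold get_plate_alt
  rw [htemp, hsuf]
  unfold pvSelB
  simp only [String.toList_ofList, PySem.Str.strIsdigit, PySem.Int.ofStr?]
  by_cases hg : ([c0, c1].all (fun c => decide (c.toNat < 128)) && PySem.Chars.strIsdigit [c0, c1]) = true
  · rw [if_pos hg, if_pos (by simpa using hg)]
    cases hof : PySem.Int.ofChars? [c0, c1] with
    | none => rfl
    | some n =>
        simp only
        by_cases hn : n < 34
        · rw [if_pos hn, if_pos hn]
        · rw [if_neg hn, if_neg hn]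
  · rw [if_neg hg, if_neg (by simpa using hg)]

-- ===== VERDICT (by name: the statement is the Claim_ definition above) =====
theorem get_plate_spec : Claim_equal_get_plate := by
  intro s hdom hpre
  unfold Pre_get_plate at hpre
  obtain ⟨c0, c1, rest, hsl⟩ : ∃ c0 c1 rest, s.toList = c0 :: c1 :: rest := by
    cases hsl : s.toList with
    | nil => rw [hsl] at hpre; simp at hpre
    | cons c0 t =>
        cases t with
        | nil => rw [hsl] at hpre; simp at hpre
        | cons c1 rest => exact ⟨c0, c1, rest, rfl⟩
  have hdc : pvDomChar c0 = true ∧ pvDomChar c1 = true := by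
    unfold Dom_get_plate pvDomStr at hdom
    rw [hsl] at hdom
    simp [List.all_eq_true] at hdom
    exact ⟨hdom.1, hdom.2.1⟩
  have ha : c0.toNat < 128 := by
    have := hdc.1; simp [pvDomChar] at this; omega
  have hb : c1.toNat < 128 := by
    have := hdc.2; simp [pvDomChar] at this; omega
  unfold Spec_get_plate
  rw [pv_A_char s c0 c1 rest hsl, pv_B_char s c0 c1 rest hsl, pv_sel_eq c0 c1 ha hb]
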